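-- pv_equiv track=rewrite | github.com/JakobTimmermann/coding_challenges | project_euler/p75-singular_integer_right_triangles/main.py | solution
-- ===== SOURCE A (Python) =====
-- def solution(max_length=300, search_range=1000):
--     triangle_lengths = {}
--     for n in range(1, search_range):
--         for m in range(n + 1, search_range):
--             a = m ** 2 - n ** 2
--             b = 2 * m * n
--             c = m ** 2 + n ** 2
--             k = 1
--             triangle_length = k * (a + b + c)
--             while triangle_length < max_length:
--                 if triangle_length not in triangle_lengths:
--                     triangle_lengths[triangle_length] = set()
--                 triplet = tuple(sorted([k * a, k * b, k * c]))
--                 triangle_lengths[triangle_length].add(triplet)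
--                 k += 1
--                 triangle_length = k * (a + b + c)
--
--     triangle_lengths = {key: triangle_lengths[key] for key in sorted(triangle_lengths.keys())}
--     return triangle_lengths
-- ===== SOURCE B (Python) =====
-- def solution(max_length=300, search_range=1000):
--     # Bound the generator loops by the perimeter 2*m*(m+n) instead of scanning
--     # the whole search_range x search_range grid, and replace the trial k-loop
--     # bound test by a closed-form multiple count.
--     res = {}
--     for n in range(1, search_range):
--         if 2 * (n + 1) * (2 * n + 1) >= max_length:
--             break
--         for m in range(n + 1, search_range):
--             p = 2 * m * (m + n)
--             if p >= max_length:
--                 break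
--             a = m * m - n * n
--             b = 2 * m * n
--             c = m * m + n * n
--             x, y = (a, b) if a < b else (b, a)
--             kmax = (max_length - 1) // p
--             for k in range(1, kmax + 1):
--                 res.setdefault(k * p, set()).add((k * x, k * y, k * c))
--     return dict(sorted(res.items(), key=lambda kv: kv[0]))
-- ===== Notes on version B (the rewrite author's own statement) =====
-- stated objective: faster
-- what changed: B bounds both generator loops by the perimeter condition 2*m*(m+n) < max_length (breaking early instead of scanning the whole search_range x search_range grid) and replaces the trial while-loop over multiples k by a closed-form count kmax = (max_length-1)//p.
import Mathlib
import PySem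

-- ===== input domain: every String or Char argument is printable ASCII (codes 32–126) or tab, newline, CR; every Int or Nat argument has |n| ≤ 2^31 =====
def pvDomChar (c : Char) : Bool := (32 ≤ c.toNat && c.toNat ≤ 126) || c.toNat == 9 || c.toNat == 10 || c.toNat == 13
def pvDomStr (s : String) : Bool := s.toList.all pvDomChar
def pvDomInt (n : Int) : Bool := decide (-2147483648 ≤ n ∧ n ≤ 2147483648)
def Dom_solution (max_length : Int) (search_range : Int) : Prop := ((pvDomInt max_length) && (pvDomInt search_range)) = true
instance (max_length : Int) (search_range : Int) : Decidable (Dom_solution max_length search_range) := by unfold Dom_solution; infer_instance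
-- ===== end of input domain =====

-- B bounds both generator loops by the perimeter 2*m*(m+n) < max_length (breaking early) and
-- replaces A's trial `while k*(a+b+c) < max_length` loop by a closed-form multiple count,
-- making it O(max_length)-ish instead of O(search_range^2).

-- ===== PORT A =====
-- the inner `while triangle_length < max_length` loop of A; `0 < a + b + c` is a totality
-- guard only: every call made by `solution` has a + b + c > 0 (Python's loop would not
-- terminate otherwise), so the guard never changes the computed value.
def tripLoopA (max_length a b c : Int) (k : Int)
    (d : PySem.Dict Int (PySem.Set (List Int))) : PySem.Dict Int (PySem.Set (List Int)) :=
  if h : 0 < a + b + c ∧ k * (a + b + c) < max_length then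
    let triangle_length := k * (a + b + c)
    let d := if d.contains triangle_length = false then d.insert triangle_length PySem.Set.empty else d
    let triplet := PySem.List.sorted [k * a, k * b, k * c] (fun x => x)
    let d := d.modify triangle_length PySem.Set.empty (fun s => PySem.Set.add s triplet)
    tripLoopA max_length a b c (k + 1) d
  else d
termination_by (max_length - k * (a + b + c)).toNat
decreasing_by
  have hexp : (k + 1) * (a + b + c) = k * (a + b + c) + (a + b + c) := by ring
  omega

def solution (max_length : Int) (search_range : Int) : List (Int × List (List Int)) :=
  let triangle_lengths : PySem.Dict Int (PySem.Set (List Int)) :=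
    (PySem.List.pyRange 1 search_range).foldl (fun d n =>
      (PySem.List.pyRange (n + 1) search_range).foldl (fun d m =>
        tripLoopA max_length (m ^ 2 - n ^ 2) (2 * m * n) (m ^ 2 + n ^ 2) 1 d) d)
      PySem.Dict.empty
  -- {key: triangle_lengths[key] for key in sorted(triangle_lengths.keys())}
  ((PySem.List.sorted triangle_lengths.keys (fun x => x)).foldl
      (fun acc key => acc.insert key (triangle_lengths.getD key PySem.Set.empty))
      PySem.Dict.empty).items

-- ===== PORT B =====
-- res.setdefault(key, set()).add(trip)
def addTripB (d : PySem.Dict Int (PySem.Set (List Int))) (key : Int) (trip : List Int) :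
    PySem.Dict Int (PySem.Set (List Int)) :=
  (d.setdefault key PySem.Set.empty).modify key PySem.Set.empty (fun s => PySem.Set.add s trip)

-- for k in range(1, kmax + 1): ...
def multiplesB (max_length p x y c : Int) (d : PySem.Dict Int (PySem.Set (List Int))) :
    PySem.Dict Int (PySem.Set (List Int)) :=
  let kmax := PySem.Int.floordiv (max_length - 1) p
  (PySem.List.pyRange 1 (kmax + 1)).foldl (fun d k => addTripB d (k * p) [k * x, k * y, k * c]) d

-- for m in range(n+1, search_range) with `if p >= max_length: break`
def mLoopB (max_length n : Int) :
    List Int → PySem.Dict Int (PySem.Set (List Int)) → PySem.Dict Int (PySem.Set (List Int))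
  | [], d => d
  | m :: ms, d =>
    let p := 2 * m * (m + n)
    if max_length ≤ p then d
    else
      let a := m * m - n * n
      let b := 2 * m * n
      let c := m * m + n * n
      let x := if a < b then a else b
      let y := if a < b then b else a
      mLoopB max_length n ms (multiplesB max_length p x y c d)

-- for n in range(1, search_range) with the early break on the smallest perimeter at this n
def nLoopB (max_length search_range : Int) :
    List Int → PySem.Dict Int (PySem.Set (List Int)) → PySem.Dict Int (PySem.Set (List Int))
  | [], d => d
  | n :: ns, d =>
    if max_length ≤ 2 * (n + 1) * (2 * n + 1) then d
    else nLoopB max_length search_range ns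
      (mLoopB max_length n (PySem.List.pyRange (n + 1) search_range) d)

def solution_alt (max_length : Int) (search_range : Int) : List (Int × List (List Int)) :=
  let res := nLoopB max_length search_range (PySem.List.pyRange 1 search_range) PySem.Dict.empty
  -- dict(sorted(res.items(), key=lambda kv: kv[0]))
  (PySem.Dict.ofList (PySem.List.sorted res.items (fun kv => kv.1))).items

-- ===== PRECONDITION & SPEC =====
def Spec_solution (max_length : Int) (search_range : Int) (out : List (Int × List (List Int))) : Prop := out = solution_alt max_length search_range
instance (max_length : Int) (search_range : Int) (out : List (Int × List (List Int))) : Decidable (Spec_solution max_length search_range out) := by unfold Spec_solution; infer_instance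

-- ===== CLAIM (what is proved, stated in full; the proofs are below) =====
def Claim_equal_solution : Prop := ∀ (max_length : Int) (search_range : Int), Dom_solution max_length search_range → Spec_solution max_length search_range (solution max_length search_range)

-- ===== LEMMAS AND PROOFS =====

-- A's "insert empty set if the key is missing, then add" is B's "setdefault, then add".
lemma step_eq (d : PySem.Dict Int (PySem.Set (List Int))) (t : Int) (trip : List Int) :
    ((if d.contains t = false then d.insert t PySem.Set.empty else d).modify t PySem.Set.empty
      (fun s => PySem.Set.add s trip)) = addTripB d t trip := by
  rcases h : d.contains t with _|_ <;>
    simp [addTripB, PySem.Dict.setdefault, PySem.Dict.insert, h]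

-- Python's sorted on three ints whose last element is maximal.
lemma sorted_three (u v w : Int) (hu : u ≤ w) (hv : v ≤ w) :
    PySem.List.sorted [u, v, w] (fun x => x) = if u ≤ v then [u, v, w] else [v, u, w] := by
  rw [PySem.List.sorted_eq_foldl_insertBy]
  simp only [List.foldl, PySem.List.insertBy]
  split_ifs <;> simp_all [PySem.List.insertBy] <;> split_ifs <;> simp_all <;> omega

-- A's sorted triplet in closed form.
lemma triplet_eq (k a b c : Int) (hk : 0 < k) (ha : a ≤ c) (hb : b ≤ c) :
    PySem.List.sorted [k * a, k * b, k * c] (fun x => x) =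
      [k * (if a < b then a else b), k * (if a < b then b else a), k * c] := by
  rw [sorted_three _ _ _ (by nlinarith) (by nlinarith)]
  rcases lt_trichotomy a b with h | h | h
  · rw [if_pos (by nlinarith), if_pos h, if_pos h]
  · subst h; simp
  · rw [if_neg (by nlinarith), if_neg (by omega), if_neg (by omega)]

-- A's trial loop over k equals B's fold over the closed-form range of multiples.
lemma tripLoop_eq (ml a b c x y p : Int) (hp : 0 < p) (hpe : a + b + c = p)
    (hx : x = if a < b then a else b) (hy : y = if a < b then b else a)
    (ha : a ≤ c) (hb : b ≤ c) :
    ∀ (N : Nat) (k : Int) (d : PySem.Dict Int (PySem.Set (List Int))), 0 < k →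
      (ml - k * p).toNat = N →
      tripLoopA ml a b c k d =
        (PySem.List.pyRange k (PySem.Int.floordiv (ml - 1) p + 1)).foldl
          (fun d j => addTripB d (j * p) [j * x, j * y, j * c]) d := by
  intro N
  induction N using Nat.strong_induction_on with
  | _ N ih =>
    intro k d hk hN
    by_cases hlt : k * p < ml
    · have hlt' : k * (a + b + c) < ml := by rw [hpe]; exact hlt
      have hkle : k ≤ PySem.Int.floordiv (ml - 1) p :=
        (PySem.Int.le_floordiv_iff_mul_le hp).2 (by omega)
      rw [tripLoopA, dif_pos ⟨by omega, hlt'⟩]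
      rw [PySem.List.pyRange_one_cons (by omega)]
      simp only [List.foldl]
      rw [step_eq, triplet_eq k a b c hk ha hb, ← hx, ← hy, hpe]
      have hdec : (ml - (k + 1) * p).toNat < N := by
        have hexp : (k + 1) * p = k * p + p := by ring
        omega
      exact ih _ hdec (k + 1) _ (by omega) rfl
    · have hgt : PySem.Int.floordiv (ml - 1) p + 1 ≤ k := by
        by_contra hcon
        have hle : k ≤ PySem.Int.floordiv (ml - 1) p := by omega
        have := (PySem.Int.le_floordiv_iff_mul_le hp).1 hle
        omega
      rw [tripLoopA, dif_neg (by rw [hpe]; omega)]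
      rw [PySem.List.pyRange_one_eq_nil (by omega)]
      rfl

-- once the primitive perimeter reaches max_length, the rest of A's m-loop adds nothing
lemma mfold_noop (ml sr n : Int) (hn : 1 ≤ n) :
    ∀ (m0 : Int) (d : PySem.Dict Int (PySem.Set (List Int))), n < m0 → ml ≤ 2 * m0 * (m0 + n) →
      (PySem.List.pyRange m0 sr).foldl (fun d m =>
          tripLoopA ml (m ^ 2 - n ^ 2) (2 * m * n) (m ^ 2 + n ^ 2) 1 d) d = d := by
  suffices h : ∀ (N : Nat) (m0 : Int) (d : PySem.Dict Int (PySem.Set (List Int))),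
      (sr - m0).toNat = N → n < m0 → ml ≤ 2 * m0 * (m0 + n) →
      (PySem.List.pyRange m0 sr).foldl (fun d m =>
          tripLoopA ml (m ^ 2 - n ^ 2) (2 * m * n) (m ^ 2 + n ^ 2) 1 d) d = d by
    intro m0 d h1 h2; exact h _ m0 d rfl h1 h2
  intro N
  induction N using Nat.strong_induction_on with
  | _ N ih =>
    intro m0 d hN h1 h2
    by_cases hm : m0 < sr
    · rw [PySem.List.pyRange_one_cons hm]
      simp only [List.foldl]
      rw [tripLoopA, dif_neg (by
        rintro ⟨-, hcon⟩
        nlinarith [hcon])]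
      exact ih (sr - (m0+1)).toNat (by omega) (m0+1) d rfl (by omega) (by nlinarith)
    · rw [PySem.List.pyRange_one_eq_nil (by omega)]
      rfl

-- A's m-loop equals B's breaking m-loop
lemma mloop_eq (ml sr n : Int) (hn : 1 ≤ n) :
    ∀ (m0 : Int) (d : PySem.Dict Int (PySem.Set (List Int))), n < m0 →
      (PySem.List.pyRange m0 sr).foldl (fun d m =>
          tripLoopA ml (m ^ 2 - n ^ 2) (2 * m * n) (m ^ 2 + n ^ 2) 1 d) d =
        mLoopB ml n (PySem.List.pyRange m0 sr) d := by
  suffices h : ∀ (N : Nat) (m0 : Int) (d : PySem.Dict Int (PySem.Set (List Int))),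
      (sr - m0).toNat = N → n < m0 →
      (PySem.List.pyRange m0 sr).foldl (fun d m =>
          tripLoopA ml (m ^ 2 - n ^ 2) (2 * m * n) (m ^ 2 + n ^ 2) 1 d) d =
        mLoopB ml n (PySem.List.pyRange m0 sr) d by
    intro m0 d h1; exact h _ m0 d rfl h1
  intro N
  induction N using Nat.strong_induction_on with
  | _ N ih =>
    intro m0 d hN h1
    by_cases hm : m0 < sr
    · by_cases hbreak : ml ≤ 2 * m0 * (m0 + n)
      · rw [mfold_noop ml sr n hn m0 d h1 hbreak]
        rw [PySem.List.pyRange_one_cons hm]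
        simp only [mLoopB]
        rw [if_pos hbreak]
      · rw [PySem.List.pyRange_one_cons hm]
        simp only [List.foldl, mLoopB, multiplesB]
        rw [if_neg hbreak]
        have ea : m0 ^ 2 - n ^ 2 = m0 * m0 - n * n := by ring
        have ec : m0 ^ 2 + n ^ 2 = m0 * m0 + n * n := by ring
        rw [ea, ec]
        rw [tripLoop_eq ml (m0 * m0 - n * n) (2 * m0 * n) (m0 * m0 + n * n) _ _
              (2 * m0 * (m0 + n)) (by nlinarith) (by ring) rfl rfl (by nlinarith) (by nlinarith)
              _ 1 d one_pos rfl]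
        exact ih (sr - (m0 + 1)).toNat (by omega) (m0 + 1) _ rfl (by omega)
    · rw [PySem.List.pyRange_one_eq_nil (by omega)]
      rfl

-- once even the smallest perimeter at n reaches max_length, the rest of A's n-loop adds nothing
lemma nfold_noop (ml sr : Int) :
    ∀ (n0 : Int) (d : PySem.Dict Int (PySem.Set (List Int))), 1 ≤ n0 →
      ml ≤ 2 * (n0 + 1) * (2 * n0 + 1) →
      (PySem.List.pyRange n0 sr).foldl (fun d n =>
          (PySem.List.pyRange (n + 1) sr).foldl (fun d m =>
            tripLoopA ml (m ^ 2 - n ^ 2) (2 * m * n) (m ^ 2 + n ^ 2) 1 d) d) d = d := by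
  suffices h : ∀ (N : Nat) (n0 : Int) (d : PySem.Dict Int (PySem.Set (List Int))),
      (sr - n0).toNat = N → 1 ≤ n0 → ml ≤ 2 * (n0 + 1) * (2 * n0 + 1) →
      (PySem.List.pyRange n0 sr).foldl (fun d n =>
          (PySem.List.pyRange (n + 1) sr).foldl (fun d m =>
            tripLoopA ml (m ^ 2 - n ^ 2) (2 * m * n) (m ^ 2 + n ^ 2) 1 d) d) d = d by
    intro n0 d h1 h2; exact h _ n0 d rfl h1 h2
  intro N
  induction N using Nat.strong_induction_on with
  | _ N ih =>
    intro n0 d hN h1 h2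
    by_cases hn : n0 < sr
    · rw [PySem.List.pyRange_one_cons hn]
      simp only [List.foldl]
      rw [mfold_noop ml sr n0 h1 (n0 + 1) d (by omega) (by nlinarith)]
      refine ih (sr - (n0 + 1)).toNat (by omega) (n0 + 1) d rfl (by omega) ?_
      have hmul : 0 ≤ (n0 + 1 - n0) * (n0 + 1 + n0) := by nlinarith
      nlinarith
    · rw [PySem.List.pyRange_one_eq_nil (by omega)]
      rfl

-- A's n-loop equals B's breaking n-loop
lemma nloop_eq (ml sr : Int) :
    ∀ (n0 : Int) (d : PySem.Dict Int (PySem.Set (List Int))), 1 ≤ n0 →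
      (PySem.List.pyRange n0 sr).foldl (fun d n =>
          (PySem.List.pyRange (n + 1) sr).foldl (fun d m =>
            tripLoopA ml (m ^ 2 - n ^ 2) (2 * m * n) (m ^ 2 + n ^ 2) 1 d) d) d =
        nLoopB ml sr (PySem.List.pyRange n0 sr) d := by
  suffices h : ∀ (N : Nat) (n0 : Int) (d : PySem.Dict Int (PySem.Set (List Int))),
      (sr - n0).toNat = N → 1 ≤ n0 →
      (PySem.List.pyRange n0 sr).foldl (fun d n =>
          (PySem.List.pyRange (n + 1) sr).foldl (fun d m =>
            tripLoopA ml (m ^ 2 - n ^ 2) (2 * m * n) (m ^ 2 + n ^ 2) 1 d) d) d =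
        nLoopB ml sr (PySem.List.pyRange n0 sr) d by
    intro n0 d h1; exact h _ n0 d rfl h1
  intro N
  induction N using Nat.strong_induction_on with
  | _ N ih =>
    intro n0 d hN h1
    by_cases hn : n0 < sr
    · by_cases hbreak : ml ≤ 2 * (n0 + 1) * (2 * n0 + 1)
      · rw [nfold_noop ml sr n0 d h1 hbreak]
        rw [PySem.List.pyRange_one_cons hn]
        simp only [nLoopB]
        rw [if_pos hbreak]
      · rw [PySem.List.pyRange_one_cons hn]
        simp only [List.foldl, nLoopB]
        rw [if_neg hbreak]
        rw [mloop_eq ml sr n0 h1 (n0 + 1) d (by omega)]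
        exact ih (sr - (n0 + 1)).toNat (by omega) (n0 + 1) _ rfl (by omega)
    · rw [PySem.List.pyRange_one_eq_nil (by omega)]
      rfl

-- keys stay duplicate-free through B's loops
lemma nodup_addTripB (d : PySem.Dict Int (PySem.Set (List Int))) (t : Int) (trip : List Int)
    (h : d.keys.Nodup) : (addTripB d t trip).keys.Nodup := by
  unfold addTripB PySem.Dict.modify
  apply PySem.Dict.nodup_keys_insert
  unfold PySem.Dict.setdefault
  rcases hc : d.contains t with _|_
  · rw [if_neg (by simp)]
    have ht : t ∉ d.keys := by
      intro hmem
      rw [← PySem.Dict.contains_iff_mem_keys] at hmem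
      simp [hc] at hmem
    have hkeys : (PySem.Dict.mk (d.items ++ [(t, PySem.Set.empty)]) :
        PySem.Dict Int (PySem.Set (List Int))).keys = d.keys ++ [t] := by
      simp [PySem.Dict.keys]
    rw [hkeys]
    exact List.Nodup.append h (List.nodup_singleton t) (by simpa using ht)
  · rw [if_pos rfl]
    exact h

lemma nodup_foldl_addTripB (f : Int → Int) (g : Int → List Int) :
    ∀ (l : List Int) (d : PySem.Dict Int (PySem.Set (List Int))), d.keys.Nodup →
      (l.foldl (fun d k => addTripB d (f k) (g k)) d).keys.Nodup := by
  intro l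
  induction l with
  | nil => intro d h; exact h
  | cons x xs ih => intro d h; exact ih _ (nodup_addTripB d (f x) (g x) h)

lemma nodup_mLoopB (ml n : Int) :
    ∀ (l : List Int) (d : PySem.Dict Int (PySem.Set (List Int))), d.keys.Nodup →
      (mLoopB ml n l d).keys.Nodup := by
  intro l
  induction l with
  | nil => intro d h; exact h
  | cons m ms ih =>
    intro d h
    simp only [mLoopB]
    by_cases hb : ml ≤ 2 * m * (m + n)
    · rw [if_pos hb]; exact h
    · rw [if_neg hb]
      refine ih _ ?_
      simp only [multiplesB]
      exact nodup_foldl_addTripB _ _ _ d h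

lemma nodup_nLoopB (ml sr : Int) :
    ∀ (l : List Int) (d : PySem.Dict Int (PySem.Set (List Int))), d.keys.Nodup →
      (nLoopB ml sr l d).keys.Nodup := by
  intro l
  induction l with
  | nil => intro d h; exact h
  | cons n ns ih =>
    intro d h
    simp only [nLoopB]
    split_ifs with hb
    · exact h
    · exact ih _ (nodup_mLoopB ml n _ d h)

-- A's rebuild-over-sorted-keys and B's sort-of-items produce the same item list
lemma format_eq (d : PySem.Dict Int (PySem.Set (List Int))) (hnd : d.keys.Nodup) :
    ((PySem.List.sorted d.keys (fun x => x)).foldl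
        (fun acc key => acc.insert key (d.getD key PySem.Set.empty)) PySem.Dict.empty).items =
      (PySem.Dict.ofList (PySem.List.sorted d.items (fun kv => kv.1))).items := by
  have hskeys : (PySem.List.sorted d.keys (fun x => x)).Perm d.keys :=
    PySem.List.sorted_perm _ _ _
  have hnds : (PySem.List.sorted d.keys (fun x => x)).Nodup := hskeys.nodup_iff.2 hnd
  have hitems : (PySem.List.sorted d.items (fun kv => kv.1)).Perm d.items :=
    PySem.List.sorted_perm _ _ _
  have hL := PySem.Dict.items_foldl_insert_fresh
    (PySem.List.sorted d.keys (fun x => x)) (fun key => key)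
    (fun key => d.getD key PySem.Set.empty) PySem.Dict.empty
    (fun a _ => PySem.Dict.contains_empty a) (by simpa using hnds)
  have hR := PySem.Dict.items_foldl_insert_fresh
    (PySem.List.sorted d.items (fun kv => kv.1)) (fun kv => kv.1) (fun kv => kv.2)
    PySem.Dict.empty (fun a _ => PySem.Dict.contains_empty a.1)
    (by
      have : ((PySem.List.sorted d.items (fun kv => kv.1)).map (fun kv => kv.1)).Perm d.keys :=
        hitems.map _
      exact this.nodup_iff.2 hnd)
  simp only [PySem.Dict.ofList, PySem.Dict.update]
  rw [hL, hR]
  simp only [PySem.Dict.empty, List.nil_append]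
  have hmapid : (PySem.List.sorted d.items (fun kv => kv.1)).map (fun kv => (kv.1, kv.2)) =
      PySem.List.sorted d.items (fun kv => kv.1) := by simp
  rw [hmapid]
  refine (PySem.List.sorted_eq_of_perm_of_pairwise_lt d.items _ (fun kv => kv.1) ?_ ?_).symm
  · have h1 := hskeys.map (fun key => (key, d.getD key PySem.Set.empty))
    rw [← PySem.Dict.items_eq_map_keys d hnd PySem.Set.empty] at h1
    exact h1
  · simp only [List.pairwise_map]
    exact ((PySem.List.sorted_pairwise d.keys (fun x => x)).and hnds).imp
      (fun h => lt_of_le_of_ne h.1 h.2)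

-- ===== VERDICT (by name: the statement is the Claim_ definition above) =====
theorem solution_spec : Claim_equal_solution := by
  intro ml sr _
  unfold Spec_solution solution solution_alt
  have hdict := nloop_eq ml sr 1 PySem.Dict.empty (le_refl 1)
  rw [hdict]
  exact format_eq _ (nodup_nLoopB ml sr _ _ PySem.Dict.nodup_keys_empty)
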